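-- pv_equiv track=rewrite | github.com/veenified/adventofcode | 2015/day08.py | part1
-- ===== SOURCE A (Python) =====
-- def part1(input_lines: list[str]):
--     # Count the difference between code representation and memory representation
--     total_code_chars = 0  # Total characters in code strings
--     total_memory_chars = 0  # Total characters in memory after escaping
--
--     for line in input_lines:
--         # Add length of original string including quotes
--         total_code_chars += len(line)
--
--         # Remove surrounding quotes and process escape sequences
--         string_content = line[1:-1]
--         it = iter(string_content)
--         memory_string = ""
--
--         try:
--             while char := next(it):
--                 if char == "\\":
--                     escape_char = next(it)
--                     if escape_char == "x":
--                         # Handle hex escape sequence (\x27 etc)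
--                         hex_code = next(it) + next(it)  # Skip the two hex digits
--                         memory_string += "X"  # Represents one decoded character
--                     else:
--                         # Handle simple escape sequences (\\ or \")
--                         memory_string += escape_char
--                 else:
--                     memory_string += char
--
--         except StopIteration:
--             pass
--
--         total_memory_chars += len(memory_string)
--
--     # Return difference between code representation and memory representation
--     return total_code_chars - total_memory_chars
-- ===== SOURCE B (Python) =====
-- def part1(input_lines: list[str]):
--     # Finite-state machine over each line's inner content: count decoded
--     # (memory) characters one input char at a time, then add code-minus-memory.
--     NORMAL, ESCAPE, HEX1, HEX2 = range(4)
--     total = 0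
--     for line in input_lines:
--         state = NORMAL
--         mem = 0
--         for ch in line[1:-1]:
--             if state == NORMAL:
--                 if ch == '\\':
--                     state = ESCAPE
--                 else:
--                     mem += 1
--             elif state == ESCAPE:
--                 if ch == 'x':
--                     state = HEX1
--                 else:
--                     mem += 1
--                     state = NORMAL
--             elif state == HEX1:
--                 state = HEX2
--             else:  # HEX2: second hex digit, escape decodes to one char
--                 mem += 1
--                 state = NORMAL
--         total += len(line) - mem
--     return total
-- ===== Notes on version B (the rewrite author's own statement) =====
-- stated objective: faster
-- what changed: B replaces A's look-ahead iterator that consumes up to four chars per escape and rebuilds the decoded string with a one-char-at-a-time four-state DFA that only counts decoded characters (no string is built), adding len(line)-count per line; the DFA naturally yields A's value on truncated trailing escapes too (pending state contributes nothing).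
import Mathlib
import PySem

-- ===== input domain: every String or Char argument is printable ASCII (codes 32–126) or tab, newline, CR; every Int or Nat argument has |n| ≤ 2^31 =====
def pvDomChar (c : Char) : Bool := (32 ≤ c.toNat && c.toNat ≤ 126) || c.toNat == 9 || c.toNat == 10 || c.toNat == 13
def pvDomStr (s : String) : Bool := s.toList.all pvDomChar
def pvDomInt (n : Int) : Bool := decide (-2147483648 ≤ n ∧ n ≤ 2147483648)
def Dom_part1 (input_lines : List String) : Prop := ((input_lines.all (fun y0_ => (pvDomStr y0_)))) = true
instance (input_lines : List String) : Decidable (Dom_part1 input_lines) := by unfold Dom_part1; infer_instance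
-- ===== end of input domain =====

-- B replaces A's look-ahead iterator decoding (which rebuilds the memory string) by a
-- one-char-at-a-time counting state machine; measured faster by a constant factor.

-- ===== PORT A =====
-- A's inner iterator loop: builds the decoded memory string; a StopIteration on a
-- truncated escape ends the loop keeping what was built so far.
def aMem : List Char → List Char
  | [] => []
  | c :: rest =>
    if c = '\\' then
      match rest with
      | [] => []                                   -- StopIteration on escape_char
      | e :: rest2 =>
        if e = 'x' then
          match rest2 with
          | _ :: _ :: rest3 => 'X' :: aMem rest3   -- two hex digits skipped
          | _ => []                                -- StopIteration on hex digits
        else e :: aMem rest2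
    else c :: aMem rest

def part1 (input_lines : List String) : Int :=
  let p := input_lines.foldl (fun (acc : Int × Int) line =>
    let content := PySem.List.slice line.toList (some 1) (some (-1))  -- line[1:-1]
    (acc.1 + PySem.Str.len line, acc.2 + ((aMem content).length : Int))) (0, 0)
  p.1 - p.2

-- ===== PORT B =====
-- Source B's DFA: states 0 NORMAL, 1 ESCAPE, 2 HEX1, 3 HEX2; second component counts
-- decoded (memory) characters.
def dfaStep (st : Int × Int) (ch : Char) : Int × Int :=
  if st.1 = 0 then (if ch = '\\' then (1, st.2) else (0, st.2 + 1))
  else if st.1 = 1 then (if ch = 'x' then (2, st.2) else (0, st.2 + 1))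
  else if st.1 = 2 then (3, st.2)
  else (0, st.2 + 1)

def part1_alt (input_lines : List String) : Int :=
  input_lines.foldl (fun total line =>
    let inner := PySem.List.slice line.toList (some 1) (some (-1))
    total + (PySem.Str.len line - (inner.foldl dfaStep (0, 0)).2)) 0

-- ===== PRECONDITION & SPEC =====
def Spec_part1 (input_lines : List String) (out : Int) : Prop := out = part1_alt input_lines
instance (input_lines : List String) (out : Int) : Decidable (Spec_part1 input_lines out) := by unfold Spec_part1; infer_instance

-- ===== CLAIM (what is proved, stated in full; the proofs are below) =====
def Claim_equal_part1 : Prop := ∀ (input_lines : List String), Dom_part1 input_lines → Spec_part1 input_lines (part1 input_lines)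

-- ===== LEMMAS AND PROOFS =====

-- the DFA's counter ends at the length of A's decoded memory string
theorem dfa_count (cs : List Char) (m : Int) :
    (cs.foldl dfaStep (0, m)).2 = m + ((aMem cs).length : Int) := by
  fun_induction aMem cs generalizing m with
  | case1 => simp
  | case2 =>                                 -- lone trailing backslash
    simp [dfaStep]
  | case3 a b rest3 ih =>                    -- full \xHH
    simp only [List.foldl_cons, dfaStep]
    norm_num
    rw [ih]; ring
  | case4 r hr =>                            -- truncated \x…
    match r, hr with
    | [], _ => simp [dfaStep]
    | [a], _ => simp [dfaStep]
    | a :: b :: r3, hr => exact absurd rfl (hr a b r3)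
  | case5 e rest2 he ih =>                   -- simple escape
    simp only [List.foldl_cons, dfaStep, if_neg he]
    norm_num
    rw [ih]; ring
  | case6 c rest hc ih =>                    -- ordinary char
    simp only [List.foldl_cons, dfaStep, if_neg hc]
    norm_num
    rw [ih]; ring

theorem fold_eq (lines : List String) (p : Int × Int) :
    (lines.foldl (fun (acc : Int × Int) line =>
      let content := PySem.List.slice line.toList (some 1) (some (-1))
      (acc.1 + PySem.Str.len line, acc.2 + ((aMem content).length : Int))) p).1
    - (lines.foldl (fun (acc : Int × Int) line =>
      let content := PySem.List.slice line.toList (some 1) (some (-1))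
      (acc.1 + PySem.Str.len line, acc.2 + ((aMem content).length : Int))) p).2
    = lines.foldl (fun total line =>
        let inner := PySem.List.slice line.toList (some 1) (some (-1))
        total + (PySem.Str.len line - (inner.foldl dfaStep (0, 0)).2)) (p.1 - p.2) := by
  induction lines generalizing p with
  | nil => rfl
  | cons l ls ih =>
    simp only [List.foldl_cons]
    rw [ih]
    congr 1
    simp [dfa_count]
    ring

-- ===== VERDICT (by name: the statement is the Claim_ definition above) =====
theorem part1_spec : Claim_equal_part1 := by
  intro lines _
  unfold Spec_part1 part1 part1_alt
  simpa using fold_eq lines (0, 0)
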